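-- pv_equiv track=rewrite | github.com/Fuyu0930/PassNGoal | PassNGoalBlog/teams/views.py | find_target_team
-- ===== SOURCE A (Python) =====
-- def find_target_team(data, target):
--     index = None
--
--     for i, team_data in enumerate(data):
--         if team_data["team_id"] == target:
--             index = i
--             break
--
--     if index == 0:
--         return data[:3]
--     elif index == len(data) - 1:
--         return data[-3:]
--     else:
--         return data[index-1:index+2]
-- ===== SOURCE B (Python) =====
-- def find_target_team(data, target):
--     # Stream the list once with a 2-element memory buffer: no index arithmetic,
--     # no slicing of the original list.
--     it = iter(data)
--     prev2 = []
--     for team in it: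
--         if team["team_id"] == target:
--             nxt = [t for t, _ in zip(it, range(2))]
--             if not nxt:
--                 return prev2 + [team]
--             if not prev2:
--                 return [team] + nxt
--             return prev2[-1:] + [team] + nxt[:1]
--         prev2 = (prev2 + [team])[-2:]
--     raise ValueError("target not found")
-- ===== Notes on version B (the rewrite author's own statement) =====
-- stated objective: alternative
-- what changed: B streams the list once through an iterator keeping only a 2-element buffer of preceding teams and assembles the 3-window from the buffer and the next one or two elements, with no index computation and no slicing of the original list
import Mathlib
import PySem

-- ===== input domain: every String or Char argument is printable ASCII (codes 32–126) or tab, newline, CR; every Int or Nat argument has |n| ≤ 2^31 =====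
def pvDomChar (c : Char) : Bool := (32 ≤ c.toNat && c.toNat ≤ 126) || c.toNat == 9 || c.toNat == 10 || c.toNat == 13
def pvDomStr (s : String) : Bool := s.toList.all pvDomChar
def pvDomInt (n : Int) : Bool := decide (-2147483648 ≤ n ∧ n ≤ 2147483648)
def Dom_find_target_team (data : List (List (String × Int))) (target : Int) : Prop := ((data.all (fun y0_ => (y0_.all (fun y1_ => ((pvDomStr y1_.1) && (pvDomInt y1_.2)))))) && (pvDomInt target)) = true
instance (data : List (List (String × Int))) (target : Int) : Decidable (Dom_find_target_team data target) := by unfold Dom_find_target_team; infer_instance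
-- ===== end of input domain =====

-- Header: B streams the list once keeping only a 2-element buffer of preceding
-- teams and assembles the 3-window from that buffer and the next elements;
-- no index computation, no slicing of the original list (alternative decomposition).

-- ===== PORT A =====
-- dict lookup team_data["team_id"]: first matching key in the association list
def teamVal (d : List (String × Int)) : Option Int :=
  (d.find? (fun q => q.1 == "team_id")).map (fun q => q.2)

-- the 'for i, team_data in enumerate(data): if …: index = i; break' loop;
-- 'none' stands for the paths where Python raises (KeyError / not found → TypeError), excluded by Pre_
def aScan : List (List (String × Int)) → Int → Nat → Option Nat
  | [], _, _ => none
  | d :: rest, target, i =>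
    match d.find? (fun q => q.1 == "team_id") with
    | none => none
    | some q => if q.2 == target then some i else aScan rest target (i + 1)

def find_target_team (data : List (List (String × Int))) (target : Int) : List (List (String × Int)) :=
  match aScan data target 0 with
  | none => []   -- Python raises here (outside Pre_)
  | some index =>
    if (index : Int) = 0 then PySem.List.slice data none (some 3)
    else if (index : Int) = (data.length : Int) - 1 then PySem.List.slice data (some (-3)) none
    else PySem.List.slice data (some ((index : Int) - 1)) (some ((index : Int) + 2))

-- ===== PORT B =====
-- the 'for team in it: …' loop of Source B; prev2 is the running 2-element buffer.
-- '[]' stands for the paths where Python raises (KeyError / ValueError), excluded by Pre_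
def bLoop (target : Int) (prev2 : List (List (String × Int))) :
    List (List (String × Int)) → List (List (String × Int))
  | [] => []   -- raise ValueError (outside Pre_)
  | team :: it =>
    match team.find? (fun q => q.1 == "team_id") with
    | none => []   -- KeyError (outside Pre_)
    | some q =>
      if q.2 == target then
        let nxt := it.take 2      -- [t for t, _ in zip(it, range(2))]
        if nxt.isEmpty then prev2 ++ [team]
        else if prev2.isEmpty then team :: nxt
        else PySem.List.slice prev2 (some (-1)) none ++ team :: PySem.List.slice nxt none (some 1)
      else bLoop target (PySem.List.slice (prev2 ++ [team]) (some (-2)) none) it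

def find_target_team_alt (data : List (List (String × Int))) (target : Int) : List (List (String × Int)) :=
  bLoop target [] data

-- ===== PRECONDITION & SPEC =====
-- Pre_ excludes exactly the inputs on which A raises: no entry matches target before
-- an entry lacking the "team_id" key (KeyError) or at all (TypeError on None - 1).
def Pre_find_target_team (data : List (List (String × Int))) (target : Int) : Prop :=
  ∃ i < data.length,
    (∀ j < i, (teamVal (data.getD j [])).isSome = true) ∧
    teamVal (data.getD i []) = some target
instance (data : List (List (String × Int))) (target : Int) : Decidable (Pre_find_target_team data target) := by unfold Pre_find_target_team; infer_instance

def pvWitness_find_target_team : (List (List (String × Int))) × Int :=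
  ([[("team_id", 1)], [("team_id", 2)], [("team_id", 3)]], 2)

def Spec_find_target_team (data : List (List (String × Int))) (target : Int) (out : List (List (String × Int))) : Prop := out = find_target_team_alt data target
instance (data : List (List (String × Int))) (target : Int) (out : List (List (String × Int))) : Decidable (Spec_find_target_team data target out) := by unfold Spec_find_target_team; infer_instance

-- ===== CLAIM (what is proved, stated in full; the proofs are below) =====
def Claim_equal_find_target_team : Prop := ∀ (data : List (List (String × Int))) (target : Int), Dom_find_target_team data target → Pre_find_target_team data target → Spec_find_target_team data target (find_target_team data target)

-- ===== LEMMAS AND PROOFS =====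

-- last two elements of a list
def last2 (l : List (List (String × Int))) : List (List (String × Int)) :=
  (l.reverse.take 2).reverse

theorem last2_snoc (l : List (List (String × Int))) (d : List (String × Int)) :
    last2 (last2 l ++ [d]) = last2 (l ++ [d]) := by
  unfold last2
  simp [List.take_take]

theorem slice_neg2_eq_last2 (l : List (List (String × Int))) :
    PySem.List.slice l (some (-2)) none = last2 l := by
  rw [PySem.List.slice_from_neg_ofNat l 2 (by norm_num)]
  unfold last2
  rcases Nat.lt_or_ge 2 l.length with h | h
  · apply List.ext_getElem
    · simp [List.length_take]; omega
    · intro i h1 h2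
      simp only [List.getElem_drop, List.getElem_reverse, List.length_reverse,
        List.length_take, List.getElem_take]
      congr 1
      simp at h1 h2 ⊢
      omega
  · rw [List.take_of_length_le (by simpa using h), List.reverse_reverse]
    simp [Nat.sub_eq_zero_of_le h]

theorem last2_eq_drop (l : List (List (String × Int))) :
    last2 l = l.drop (l.length - 2) := by
  rw [← slice_neg2_eq_last2, PySem.List.slice_from_neg_ofNat l 2 (by norm_num)]

-- main characterization of bLoop under a first-match hypothesis
theorem bLoop_char (target : Int) :
    ∀ (xs : List (List (String × Int))),
    (∃ i < xs.length,
      (∀ j < i, (teamVal (xs.getD j [])).isSome = true) ∧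
      teamVal (xs.getD i []) = some target) →
    ∃ f < xs.length,
      teamVal (xs.getD f []) = some target ∧
      (∀ s, aScan xs target s = some (s + f)) ∧
      (∀ pre, bLoop target (last2 pre) xs =
        (let p := last2 (pre ++ xs.take f)
         let hd := xs.getD f []
         let t := xs.drop (f + 1)
         if t.isEmpty then p ++ [hd]
         else if p.isEmpty then hd :: t.take 2
         else PySem.List.slice p (some (-1)) none ++ hd :: t.take 1)) := by
  intro xs
  induction xs with
  | nil => rintro ⟨i, hi, _⟩; simp at hi
  | cons d rest ih =>
    intro h
    by_cases hd : teamVal d = some target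
    · obtain ⟨q, hq, hq2⟩ : ∃ q, d.find? (fun q => q.1 == "team_id") = some q ∧ q.2 = target := by
        simp only [teamVal, Option.map_eq_some_iff] at hd
        obtain ⟨q, h1, h2⟩ := hd; exact ⟨q, h1, h2⟩
      refine ⟨0, by simp, by simpa using hd, fun s => by simp [aScan, hq, hq2], fun pre => ?_⟩
      simp only [bLoop, hq, hq2, beq_self_eq_true, if_true]
      simp only [List.take_zero, List.append_nil, List.drop_succ_cons, List.drop_zero,
        List.getD_cons_zero]
      rcases rest with _ | ⟨a, rest'⟩
      · simp
      · have hs1 : PySem.List.slice (a :: rest'.take 1) none (some 1) = [a] := by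
          rw [PySem.List.slice_to] <;> simp
        have ht1 : (a :: rest').take 1 = [a] := by simp
        simp only [List.take_succ_cons, List.isEmpty_cons, Bool.false_eq_true, if_false, hs1, ht1]
    · obtain ⟨i, hi, hpre, hmatch⟩ := h
      have hine : i ≠ 0 := by rintro rfl; exact hd (by simpa using hmatch)
      obtain ⟨q, hq, hq2⟩ : ∃ q, d.find? (fun q => q.1 == "team_id") = some q ∧ q.2 ≠ target := by
        have h0 := hpre 0 (Nat.pos_of_ne_zero hine)
        simp only [List.getD_cons_zero, teamVal, Option.isSome_map] at h0
        obtain ⟨q, hq⟩ := Option.isSome_iff_exists.mp h0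
        refine ⟨q, hq, fun hc => hd ?_⟩
        simp [teamVal, hq, hc]
      obtain ⟨f, hf, hfv, hsc, hbl⟩ := ih ⟨i - 1, by
        simp only [List.length_cons] at hi; omega,
        fun j hj => by
          have := hpre (j + 1) (by omega)
          simpa using this,
        by
          have : (d :: rest).getD i [] = rest.getD (i - 1) [] := by
            obtain ⟨i', rfl⟩ := Nat.exists_eq_succ_of_ne_zero hine
            simp
          rw [this] at hmatch; exact hmatch⟩
      refine ⟨f + 1, by simpa using Nat.succ_lt_succ hf, by simpa using hfv, ?_, ?_⟩
      · intro s
        simp only [aScan, hq]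
        rw [if_neg (by simpa using hq2)]
        rw [hsc (s + 1)]; congr 1; omega
      · intro pre
        simp only [bLoop, hq]
        rw [if_neg (by simpa using hq2)]
        rw [slice_neg2_eq_last2, last2_snoc, hbl (pre ++ [d])]
        simp [List.append_assoc]

-- ===== VERDICT (by name: the statement is the Claim_ definition above) =====
theorem find_target_team_spec : Claim_equal_find_target_team := by
  intro data target _ hpre
  unfold Spec_find_target_team
  obtain ⟨f, hf, hfv, hsc, hbl⟩ := bLoop_char target data hpre
  have hb := hbl []
  unfold find_target_team find_target_team_alt
  rw [hsc 0]
  simp only [Nat.zero_add]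
  have hb' : bLoop target [] data =
      (let p := last2 (data.take f)
       let hd := data.getD f []
       let t := data.drop (f + 1)
       if t.isEmpty then p ++ [hd]
       else if p.isEmpty then hd :: t.take 2
       else PySem.List.slice p (some (-1)) none ++ hd :: t.take 1) := by
    simpa [last2] using hb
  rw [hb']
  have hlen := hf
  have hgetD : data.getD f [] = data[f] := List.getD_eq_getElem data [] hf
  by_cases h0 : f = 0
  · subst h0
    rw [if_pos (by norm_num)]
    rcases data with _ | ⟨x, r⟩
    · simp at hf
    · have hsl : PySem.List.slice (x :: r) none (some 3) = (x :: r).take ((3 : Int).toNat) := by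
        rw [PySem.List.slice_to]; norm_num
      rw [hsl]
      simp only [List.take_zero, last2, List.reverse_nil,
        List.drop_succ_cons, List.drop_zero, List.getD_cons_zero]
      rcases r with _ | ⟨y, r'⟩
      · simp
      · simp
  · rw [if_neg (by exact_mod_cast h0)]
    by_cases hlast : f = data.length - 1
    · rw [if_pos (by omega)]
      rw [PySem.List.slice_from_neg_ofNat data 3 (by norm_num)]
      have ht : data.drop (f + 1) = [] := by
        apply List.drop_eq_nil_of_le; omega
      rw [ht]
      simp only [List.isEmpty_nil, if_true]
      rw [last2_eq_drop, List.drop_take]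
      have hlq : (data.take f).length = f := by simp; omega
      rw [hlq]
      have hidx : data.length - 3 = f - 2 := by omega
      rw [hidx]
      set l' := data.drop (f - 2) with hl'
      have hll' : l'.length = data.length - (f - 2) := by simp [hl']
      have hne : l' ≠ [] := by
        intro hc; rw [hc] at hll'; simp at hll'; omega
      calc l' = l'.dropLast ++ [l'.getLast hne] := (List.dropLast_append_getLast hne).symm
        _ = l'.take (f - (f - 2)) ++ [data.getD f []] := by
            congr 1
            · rw [List.dropLast_eq_take]; congr 1; omega
            · congr 1
              rw [List.getLast_eq_getElem, hgetD]
              simp only [hl', List.getElem_drop, List.length_drop]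
              congr 1
              omega
    · rw [if_neg (by push_cast; omega)]
      have hmid : 1 ≤ f ∧ f + 2 ≤ data.length := by
        constructor
        · omega
        · omega
      have hcast : ((f : Int) - 1) = ((f - 1 : Nat) : Int) := by omega
      have hcast2 : ((f : Int) + 2) = ((f - 1 : Nat) : Int) + ((3 : Nat) : Int) := by
        push_cast; omega
      rw [hcast, hcast2, PySem.List.slice_natCast_add]
      have ht : ¬ (data.drop (f + 1)).isEmpty = true := by
        simp [List.isEmpty_iff, List.drop_eq_nil_iff]; omega
      rw [if_neg ht]
      have hp : ¬ (last2 (data.take f)).isEmpty = true := by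
        rw [last2_eq_drop]
        simp [List.isEmpty_iff, List.drop_eq_nil_iff]
        omega
      rw [if_neg hp]
      have hpart1 : PySem.List.slice (last2 (data.take f)) (some (-1)) none
          = [data[f - 1]'(by omega)] := by
        rw [PySem.List.slice_from_neg_one, last2_eq_drop]
        apply List.ext_getElem
        · simp; omega
        · intro i h1 h2
          simp only [List.length_drop, List.length_take] at h1
          have hi0 : i = 0 := by omega
          subst hi0
          simp only [List.getElem_drop, List.getElem_take, List.getElem_cons_zero,
            List.length_take, List.length_drop]
          congr 1
          simp
          omega
      have hpart3 : (data.drop (f + 1)).take 1 = [data[f + 1]'(by omega)] := by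
        rw [List.take_one, List.head?_drop, List.getElem?_eq_getElem (by omega : f + 1 < data.length)]
        rfl
      rw [hpart1, hpart3, hgetD]
      apply List.ext_getElem
      · simp; omega
      · intro i h1 h2
        simp only [List.length_take, List.length_drop] at h1
        have hi3 : i < 3 := by omega
        interval_cases i <;> simp [List.getElem_cons] <;> (congr 1 <;> omega)
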